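-- pv_equiv track=rewrite | github.com/jalddak/ps_training | python/programmers/level 0/진료 순서 정하기.py | solution
-- ===== SOURCE A (Python) =====
-- def solution(emergency):
--     emergency_sort = sorted(emergency, reverse = True)
--     dict = {}
--     answer = []
--     for index in range(len(emergency_sort)):
--         dict[emergency_sort[index]] = index + 1
--     for e in emergency:
--         answer.append(dict[e])
--     return answer
-- ===== SOURCE B (Python) =====
-- def solution(emergency):
--     # Rank of e = n - (index where e would be inserted in the ascending sort),
--     # found by a hand-written binary search: no dict, just one sort + bisect.
--     s = sorted(emergency)
--     n = len(s)
--     answer = []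
--     for e in emergency:
--         lo, hi = 0, n
--         while lo < hi:
--             mid = (lo + hi) // 2
--             if s[mid] < e:
--                 lo = mid + 1
--             else:
--                 hi = mid
--         answer.append(n - lo)
--     return answer
-- ===== Notes on version B (the rewrite author's own statement) =====
-- stated objective: alternative
-- what changed: Replaced A's descending sort + last-write-wins index dict + per-element dict lookup by an ascending sort plus a hand-written binary search per element (rank = n - bisect_left position), with no dict at all; same O(n log n) cost, but A's C-level dict is faster in CPython.
import Mathlib
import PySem

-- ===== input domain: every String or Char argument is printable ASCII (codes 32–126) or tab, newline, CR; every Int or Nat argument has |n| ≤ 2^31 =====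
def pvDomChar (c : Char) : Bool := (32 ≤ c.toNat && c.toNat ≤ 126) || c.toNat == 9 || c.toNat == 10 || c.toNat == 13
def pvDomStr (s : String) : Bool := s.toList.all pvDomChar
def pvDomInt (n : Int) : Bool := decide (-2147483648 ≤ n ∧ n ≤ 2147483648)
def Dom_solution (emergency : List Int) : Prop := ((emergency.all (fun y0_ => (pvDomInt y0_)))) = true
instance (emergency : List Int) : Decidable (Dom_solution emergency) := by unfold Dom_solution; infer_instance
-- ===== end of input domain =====

-- B ranks by ascending sort + binary search (rank = n - bisect position) instead of A's
-- descending sort + index dict; return values agree everywhere.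

-- ===== PORT A =====
def solution (emergency : List Int) : List Int :=
  let emergency_sort := PySem.List.sorted emergency (fun x => x) true
  let d := (PySem.List.pyRange 0 (emergency_sort.length : Int) 1).foldl
    (fun d i => d.insert (PySem.List.pyGetD emergency_sort i 0) (i + 1)) PySem.Dict.empty
    -- emergency_sort[index]: index ∈ range(len), always in range, so pyGetD is exact here
  emergency.foldl (fun answer e => answer ++ [d.getD e 0]) []
    -- dict[e]: e ∈ emergency ⊆ keys, so the key is always present and getD is exact here

-- ===== PORT B =====
-- Source B's while loop, fueled: hi - lo shrinks every iteration, so fuel = n (the initial hi - lo)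
-- is enough; lo, hi ≥ 0 throughout, so Nat with Nat division matches Python's ints with //.
def bisectLoop (s : List Int) (e : Int) : Nat → Nat → Nat → Nat
  | 0, lo, _ => lo
  | fuel + 1, lo, hi =>
    if lo < hi then
      match s[(lo + hi) / 2]? with
      | some y => if y < e then bisectLoop s e fuel ((lo + hi) / 2 + 1) hi
                  else bisectLoop s e fuel lo ((lo + hi) / 2)
      | none => lo
    else lo

def solution_alt (emergency : List Int) : List Int :=
  let s := PySem.List.sorted emergency (fun x => x) false
  let n := s.length
  emergency.foldl (fun answer e => answer ++ [(n : Int) - (bisectLoop s e n 0 n : Int)]) []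

-- ===== PRECONDITION & SPEC =====
def Spec_solution (emergency : List Int) (out : List Int) : Prop := out = solution_alt emergency
instance (emergency : List Int) (out : List Int) : Decidable (Spec_solution emergency out) := by unfold Spec_solution; infer_instance

-- ===== CLAIM (what is proved, stated in full; the proofs are below) =====
def Claim_equal_solution : Prop := ∀ (emergency : List Int), Dom_solution emergency → Spec_solution emergency (solution emergency)

-- ===== LEMMAS AND PROOFS =====

-- On a descending list, the last write for key e in A's index loop is e's rank: start + #{x ≥ e}.
theorem rank_fold (s : List Int) (hs : s.Pairwise (fun a b => b ≤ a)) :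
    ∀ (start : Int) (d : PySem.Dict Int Int) (e : Int),
      ((PySem.List.enumerate s start).foldl (fun d p => d.insert p.2 (p.1 + 1)) d).getD e 0 =
        if e ∈ s then start + (s.countP (fun x => decide (e ≤ x)) : Int) else d.getD e 0 := by
  induction s with
  | nil => intro start d e; simp [PySem.List.enumerate_nil]
  | cons x t ih =>
    intro start d e
    rw [List.pairwise_cons] at hs
    rw [PySem.List.enumerate_cons, List.foldl_cons, ih hs.2 (start + 1)]
    by_cases het : e ∈ t
    · have hex : e ≤ x := hs.1 e het
      simp [het, hex]
      ring
    · by_cases hex : e = x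
      · subst hex
        have h0 : t.countP (fun x => decide (e ≤ x)) = 0 := by
          apply List.countP_eq_zero.mpr
          intro y hy
          have : y ≤ e := hs.1 y hy
          have : y ≠ e := fun h => het (h ▸ hy)
          simp; omega
        simp [het, PySem.Dict.getD_insert_self, h0]
      · simp only [het, if_false]
        rw [PySem.Dict.getD_insert_of_ne _ _ _ hex]
        simp [het, hex]

theorem dict_getD (l : List Int) (e : Int) (he : e ∈ l) :
    ((PySem.List.pyRange 0 ((PySem.List.sorted l (fun x => x) true).length : Int) 1).foldl
        (fun d i => d.insert (PySem.List.pyGetD (PySem.List.sorted l (fun x => x) true) i 0) (i + 1))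
        PySem.Dict.empty).getD e 0
      = (l.countP (fun x => decide (e ≤ x)) : Int) := by
  have hb : PySem.List.enumerate (PySem.List.sorted l (fun x => x) true) 0 =
      (PySem.List.pyRange 0 ((PySem.List.sorted l (fun x => x) true).length : Int) 1).map
        (fun j => (j, PySem.List.pyGetD (PySem.List.sorted l (fun x => x) true) j 0)) :=
    PySem.List.enumerate_eq_map_pyRange _ _
  rw [show (fun (d : PySem.Dict Int Int) (i : Int) =>
        d.insert (PySem.List.pyGetD (PySem.List.sorted l (fun x => x) true) i 0) (i + 1)) =
      (fun d i => (fun (d : PySem.Dict Int Int) (p : Int × Int) => d.insert p.2 (p.1 + 1)) d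
        ((fun j => (j, PySem.List.pyGetD (PySem.List.sorted l (fun x => x) true) j 0)) i)) from rfl,
    ← List.foldl_map (f := fun j => (j, PySem.List.pyGetD (PySem.List.sorted l (fun x => x) true) j 0))
      (g := fun (d : PySem.Dict Int Int) (p : Int × Int) => d.insert p.2 (p.1 + 1)), ← hb,
    rank_fold _ (PySem.List.sorted_pairwise_rev l (fun x => x)) 0 PySem.Dict.empty e]
  have hmem : e ∈ PySem.List.sorted l (fun x => x) true := (PySem.List.mem_sorted _ _ _ _).mpr he
  rw [if_pos hmem, (PySem.List.sorted_perm l (fun x => x) true).countP_eq]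
  ring

-- Source B's hand-written loop is exactly PySem's Python-exact bisect_left loop
theorem bisectLoop_eq (s : List Int) (e : Int) :
    ∀ (fuel lo hi : Nat), bisectLoop s e fuel lo hi = PySem.List.bisectLeftLoop s e fuel lo hi := by
  intro fuel
  induction fuel with
  | zero => intro lo hi; rfl
  | succ f ih =>
    intro lo hi
    rw [bisectLoop, PySem.List.bisectLeftLoop]
    by_cases h : lo < hi
    · simp only [h, if_true]
      cases s[(lo + hi) / 2]? with
      | none => rfl
      | some y => by_cases hy : y < e <;> simp [hy, ih]
    · simp [h]

-- on the ascending sort, the bisect position is the number of elements < e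
theorem bisect_eq_countP (s : List Int) (e : Int)
    (hs : s.Pairwise (fun a b => a ≤ b)) :
    PySem.List.bisectLeft s e = s.countP (fun x => decide (x < e)) := by
  obtain ⟨hle, hlt, hge⟩ := PySem.List.bisectLeft_spec s e hs
  set k := PySem.List.bisectLeft s e with hk
  have hsplit : s = s.take k ++ s.drop k := (List.take_append_drop k s).symm
  rw [hsplit, List.countP_append]
  have h1 : (s.take k).countP (fun x => decide (x < e)) = k := by
    rw [List.countP_eq_length.mpr, List.length_take, Nat.min_eq_left hle]
    intro x hx
    obtain ⟨j, hj, hx⟩ := List.mem_iff_getElem.mp hx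
    have hjk : j < k := lt_of_lt_of_le hj (by simp)
    rw [List.getElem_take] at hx
    simpa [← hx] using hlt j (lt_of_lt_of_le hjk hle) hjk
  have h2 : (s.drop k).countP (fun x => decide (x < e)) = 0 := by
    rw [List.countP_eq_zero]
    intro x hx
    obtain ⟨j, hj, hx⟩ := List.mem_iff_getElem.mp hx
    rw [List.getElem_drop] at hx
    have hjlen : k + j < s.length := by
      have := hj; simp only [List.length_drop] at this; omega
    have := hge (k + j) hjlen (Nat.le_add_right _ _)
    rw [hx] at this
    simp only [decide_eq_true_eq]
    omega
  omega

-- ===== VERDICT (by name: the statement is the Claim_ definition above) =====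
theorem solution_spec : Claim_equal_solution := by
  intro emergency _
  unfold Spec_solution solution solution_alt
  rw [PySem.List.foldl_append_singleton_eq_map, PySem.List.foldl_append_singleton_eq_map,
    List.nil_append, List.nil_append]
  apply List.map_congr_left
  intro e he
  rw [dict_getD emergency e he]
  have hs := PySem.List.sorted_pairwise emergency (fun x => x)
  have hb : bisectLoop (PySem.List.sorted emergency (fun x => x) false) e
      (PySem.List.sorted emergency (fun x => x) false).length 0
      (PySem.List.sorted emergency (fun x => x) false).length
      = PySem.List.bisectLeft (PySem.List.sorted emergency (fun x => x) false) e :=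
    bisectLoop_eq _ _ _ _ _
  rw [hb, bisect_eq_countP _ e hs]
  have hperm := PySem.List.sorted_perm emergency (fun x => x) false
  have hlen : (PySem.List.sorted emergency (fun x => x) false).length = emergency.length :=
    hperm.length_eq
  have hcnt : ∀ p : Int → Bool, (PySem.List.sorted emergency (fun x => x) false).countP p
      = emergency.countP p := fun p => hperm.countP_eq p
  rw [hcnt, hlen]
  have hsum := List.length_eq_countP_add_countP (fun x => decide (x < e)) (l := emergency)
  have hco : emergency.countP (fun a => decide (¬(decide (a < e)) = true))
      = emergency.countP (fun x => decide (e ≤ x)) := by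
    apply List.countP_congr
    intro x _
    simp only [decide_eq_true_eq, decide_not]
    by_cases h : x < e
    · simp [h, not_le.mpr h]
    · simp [h, not_lt.mp h]
  rw [hco] at hsum
  omega
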